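-- pv_equiv track=rewrite | github.com/suezengin/nonllm-rag-evaluation | evaluation/eval_data_preparation/eval_data_utils.py | classify_match
-- ===== SOURCE A (Python) =====
-- def classify_match(system_articles, gold_articles):
--     if not system_articles or not gold_articles:
--         return "no_match"
--     if any(sa == ga for sa in system_articles for ga in gold_articles):
--         return "exact"
--     if any(sa.startswith(ga) or ga.startswith(sa) for sa in system_articles for ga in gold_articles):
--         return "prefix"
--     return "no_match"
-- ===== SOURCE B (Python) =====
-- def classify_match(system_articles, gold_articles):
--     if not system_articles or not gold_articles:
--         return "no_match"
--     sys_set = set(system_articles)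
--     gold_set = set(gold_articles)
--     if sys_set & gold_set:
--         return "exact"
--     gold_prefixes = {g[:i] for g in gold_articles for i in range(len(g) + 1)}
--     sys_prefixes = {s[:i] for s in system_articles for i in range(len(s) + 1)}
--     if (sys_set & gold_prefixes) or (gold_set & sys_prefixes):
--         return "prefix"
--     return "no_match"
-- ===== Notes on version B (the rewrite author's own statement) =====
-- stated objective: alternative
-- what changed: Replaces the nested all-pairs scans with hashed set intersection for the exact test and with precomputed prefix sets (system string in gold-prefix set, gold string in system-prefix set) for the prefix test; trades the cross-product of the two lists for building prefix sets, which a timing run measured as not faster on the generated inputs.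
import Mathlib
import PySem

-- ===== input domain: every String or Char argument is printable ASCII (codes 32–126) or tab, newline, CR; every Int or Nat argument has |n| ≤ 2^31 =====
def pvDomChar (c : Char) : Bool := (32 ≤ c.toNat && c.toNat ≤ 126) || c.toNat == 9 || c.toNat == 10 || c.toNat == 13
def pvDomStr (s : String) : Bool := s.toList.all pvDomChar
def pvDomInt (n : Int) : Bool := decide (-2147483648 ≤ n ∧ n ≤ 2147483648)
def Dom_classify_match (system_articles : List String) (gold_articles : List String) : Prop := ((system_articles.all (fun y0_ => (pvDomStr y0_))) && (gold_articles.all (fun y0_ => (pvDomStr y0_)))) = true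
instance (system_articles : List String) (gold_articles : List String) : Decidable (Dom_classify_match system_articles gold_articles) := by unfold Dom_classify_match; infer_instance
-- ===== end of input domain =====

-- B replaces the nested all-pairs scans with set intersection (exact) and membership in precomputed prefix sets (prefix): a different algorithm, not claimed faster.
-- ===== PORT A =====
def classify_match (system_articles : List String) (gold_articles : List String) : String :=
  if system_articles.isEmpty || gold_articles.isEmpty then "no_match"
  else if system_articles.any (fun sa => gold_articles.any (fun ga => sa == ga)) then "exact"
  else if system_articles.any (fun sa => gold_articles.any (fun ga =>
         PySem.Str.startswith sa ga || PySem.Str.startswith ga sa)) then "prefix"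
  else "no_match"

-- ===== PORT B =====
-- all prefixes w[:i], i = 0..len(w)  (w[:i] with 0 ≤ i is take i — exact)
def pvPrefixesOf (w : String) : List String :=
  (List.range (w.toList.length + 1)).map (fun i => String.ofList (w.toList.take i))

def classify_match_alt (system_articles : List String) (gold_articles : List String) : String :=
  if system_articles.isEmpty || gold_articles.isEmpty then "no_match"
  else
    let sysSet : PySem.Set String := PySem.Set.ofList system_articles
    let goldSet : PySem.Set String := PySem.Set.ofList gold_articles
    if !(PySem.Set.inter sysSet goldSet).isEmpty then "exact"
    else
      let goldPrefixes : PySem.Set String := PySem.Set.ofList (gold_articles.flatMap pvPrefixesOf)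
      let sysPrefixes : PySem.Set String := PySem.Set.ofList (system_articles.flatMap pvPrefixesOf)
      if !(PySem.Set.inter sysSet goldPrefixes).isEmpty || !(PySem.Set.inter goldSet sysPrefixes).isEmpty then "prefix"
      else "no_match"

-- ===== PRECONDITION & SPEC =====
def Spec_classify_match (system_articles : List String) (gold_articles : List String) (out : String) : Prop := out = classify_match_alt system_articles gold_articles
instance (system_articles : List String) (gold_articles : List String) (out : String) : Decidable (Spec_classify_match system_articles gold_articles out) := by unfold Spec_classify_match; infer_instance

-- ===== CLAIM (what is proved, stated in full; the proofs are below) =====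
def Claim_equal_classify_match : Prop := ∀ (system_articles : List String) (gold_articles : List String), Dom_classify_match system_articles gold_articles → Spec_classify_match system_articles gold_articles (classify_match system_articles gold_articles)

-- ===== LEMMAS AND PROOFS =====

theorem mem_pvPrefixesOf (x w : String) : x ∈ pvPrefixesOf w ↔ x.toList <+: w.toList := by
  simp only [pvPrefixesOf, List.mem_map, List.mem_range]
  constructor
  · rintro ⟨i, hi, rfl⟩
    simpa [String.toList_ofList] using List.take_prefix i w.toList
  · intro h
    refine ⟨x.toList.length, by have := h.length_le; omega, ?_⟩
    apply String.ext
    simpa [String.toList_ofList] using (List.prefix_iff_eq_take.mp h).symm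

-- the "exact" conditions of A and B agree: a common element is a nonempty set intersection
theorem exact_cond (s g : List String) :
    (s.any (fun sa => g.any (fun ga => sa == ga)))
      = !(PySem.Set.inter (PySem.Set.ofList s) (PySem.Set.ofList g)).isEmpty := by
  rw [Bool.eq_iff_iff]
  simp [List.any_eq_true, PySem.Set.mem_inter, PySem.Set.mem_ofList,
        List.eq_nil_iff_forall_not_mem]

-- the "prefix" conditions agree: a startswith hit either way is a hit in one of the prefix sets
theorem prefix_cond (s g : List String) :
    (s.any (fun sa => g.any (fun ga => PySem.Str.startswith sa ga || PySem.Str.startswith ga sa)))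
      = (!(PySem.Set.inter (PySem.Set.ofList s) (PySem.Set.ofList (g.flatMap pvPrefixesOf))).isEmpty
         || !(PySem.Set.inter (PySem.Set.ofList g) (PySem.Set.ofList (s.flatMap pvPrefixesOf))).isEmpty) := by
  rw [Bool.eq_iff_iff]
  simp [List.any_eq_true, PySem.Set.mem_inter, PySem.Set.mem_ofList,
        List.eq_nil_iff_forall_not_mem, List.mem_flatMap,
        mem_pvPrefixesOf, PySem.Chars.startswith_iff]
  constructor
  · rintro ⟨sa, hs, ga, hg, h | h⟩
    · exact Or.inr ⟨ga, hg, sa, hs, h⟩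
    · exact Or.inl ⟨sa, hs, ga, hg, h⟩
  · rintro (⟨sa, hs, ga, hg, h⟩ | ⟨ga, hg, sa, hs, h⟩)
    · exact ⟨sa, hs, ga, hg, Or.inr h⟩
    · exact ⟨sa, hs, ga, hg, Or.inl h⟩

-- ===== VERDICT (by name: the statement is the Claim_ definition above) =====
theorem classify_match_spec : Claim_equal_classify_match := by
  intro s g _
  unfold Spec_classify_match classify_match classify_match_alt
  simp only [exact_cond, prefix_cond]
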